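-- pv_equiv track=rewrite | github.com/Pashadark/Ratlandia | handlers/titles.py | get_title_by_level
-- ===== SOURCE A (Python) =====
-- from typing import Dict, List, Optional
--
-- TITLES = {
--     # 🎓 ТИТУЛЫ ЗА УРОВЕНЬ
--     "novice": {"name": "🌱 Новичок", "type": "level", "level": 1, "icon": "🌱", "desc": "Начало пути"},
--     "curious": {"name": "👀 Любопытный", "type": "level", "level": 5, "icon": "👀", "desc": "Первые шаги в норе"},
--     "explorer": {"name": "🔍 Исследователь", "type": "level", "level": 10, "icon": "🔍", "desc": "Познаёт тайны норы"},
--     "experienced": {"name": "🧀 Бывалый", "type": "level", "level": 15, "icon": "🧀", "desc": "Знает где лежит сыр"},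
--     "hunter": {"name": "🎯 Охотник", "type": "level", "level": 20, "icon": "🎯", "desc": "Острый нюх на Крысу"},
--     "veteran": {"name": "⚔️ Ветеран", "type": "level", "level": 25, "icon": "⚔️", "desc": "Закалён в битвах"},
--     "master": {"name": "🏆 Мастер", "type": "level", "level": 30, "icon": "🏆", "desc": "Мастер своего дела"},
--     "expert": {"name": "💎 Эксперт", "type": "level", "level": 40, "icon": "💎", "desc": "Эксперт по выживанию"},
--     "legend": {"name": "👑 Легенда", "type": "level", "level": 50, "icon": "👑", "desc": "Легенда Ратляндии"},
--     "myth": {"name": "🌟 Миф", "type": "level", "level": 75, "icon": "🌟", "desc": "Мифический герой"},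
--     "god": {"name": "⚡ Бог норы", "type": "level", "level": 100, "icon": "⚡", "desc": "Вершина эволюции"},
--
--     # 🎯 ТИТУЛЫ ЗА ДОСТИЖЕНИЯ
--     "rat_king": {"name": "🐀👑 Крысиный король", "type": "achievement", "ach_id": "rat_king", "icon": "🐀👑", "desc": "15 побед за Крысу"},
--     "rat_emperor": {"name": "🏰🐀 Крысиный император", "type": "achievement", "ach_id": "rat_emperor", "icon": "🏰", "desc": "50 побед за Крысу"},
--     "pack_leader": {"name": "🐭👑 Вожак стаи", "type": "achievement", "ach_id": "pack_leader", "icon": "🐭👑", "desc": "30 побед за Мышь"},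
--     "mouse_god": {"name": "⚡🐭 Бог мышей", "type": "achievement", "ach_id": "mouse_god", "icon": "⚡", "desc": "100 побед за Мышь"},
--     "merciless": {"name": "🔪 Мясник", "type": "achievement", "ach_id": "merciless", "icon": "🔪", "desc": "25 убийств"},
--     "butcher": {"name": "💀 Безжалостный", "type": "achievement", "ach_id": "butcher", "icon": "💀", "desc": "100 убийств"},
--     "psychic": {"name": "🔮 Экстрасенс", "type": "achievement", "ach_id": "psychic", "icon": "🔮", "desc": "Угадать Крысу 5 раз подряд"},
--     "puppeteer": {"name": "🎪 Кукольник", "type": "achievement", "ach_id": "puppeteer", "icon": "🎪", "desc": "Подставить невиновного"},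
--     "eagle_eye": {"name": "🔍 Детектив", "type": "achievement", "ach_id": "eagle_eye", "icon": "🔍", "desc": "Угадать Крысу с первого раза"},
--     "night_hunter": {"name": "🌙 Ночной охотник", "type": "achievement", "ach_id": "night_hunter", "icon": "🌙", "desc": "Убивать каждую ночь"},
--
--     # 🔥 ТИТУЛЫ ЗА СЕРИИ
--     "lucky": {"name": "🍀 Везунчик", "type": "streak", "streak": 3, "icon": "🍀", "desc": "3 победы подряд"},
--     "invincible": {"name": "🔥 Непобедимый", "type": "streak", "streak": 5, "icon": "🔥", "desc": "5 побед подряд"},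
--     "legendary_streak": {"name": "🌟 Легендарный", "type": "streak", "streak": 10, "icon": "🌟", "desc": "10 побед подряд"},
--     "machine": {"name": "🤖 Машина", "type": "streak", "streak": 15, "icon": "🤖", "desc": "15 побед подряд"},
--
--     # 🎁 ТИТУЛЫ ЗА КОЛЛЕКЦИЮ
--     "collector": {"name": "📦 Собиратель", "type": "collection", "items": 20, "icon": "📦", "desc": "20 предметов в инвентаре"},
--     "hoarder": {"name": "🏺 Коллекционер", "type": "collection", "items": 50, "icon": "🏺", "desc": "50 предметов"},
--     "cheese_tycoon": {"name": "🧀💎 Сырный магнат", "type": "collection", "legendary": 10, "icon": "🧀💎", "desc": "10 легендарных предметов"},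
--     "mythic_hunter": {"name": "🌌 Мифический охотник", "type": "collection", "mythic": 5, "icon": "🌌", "desc": "5 мифических предметов"},
--
--     # 🎲 ТИТУЛЫ ЗА КОСТИ (ТАВЕРНА)
--     "dice_novice": {"name": "🎲 Новичок таверны", "type": "dice", "games": 5, "icon": "🎲", "desc": "Сыграть 5 игр в кости"},
--     "dice_player": {"name": "🃏 Игрок", "type": "dice", "games": 25, "icon": "🃏", "desc": "Сыграть 25 игр в кости"},
--     "dice_gambler": {"name": "💰 Азартный", "type": "dice", "games": 50, "icon": "💰", "desc": "Сыграть 50 игр в кости"},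
--     "dice_shadow": {"name": "🌑 Любимец Тени", "type": "dice", "games": 100, "icon": "🌑", "desc": "Сыграть 100 игр в кости"},
--     "dice_legend": {"name": "🏆 Легенда таверны", "type": "dice", "games": 250, "icon": "🏆", "desc": "Сыграть 250 игр в кости"},
--
--     # 🍺 ТИТУЛЫ ЗА ПИВО (ИЛЬЯС ЭЛЬ)
--     "beer_lover": {"name": "🍺 Ценитель эля", "type": "beer", "count": 5, "icon": "🍺", "desc": "Выпить 5 кружек Ильяс эля"},
--     "beer_connoisseur": {"name": "🍻 Знаток", "type": "beer", "count": 15, "icon": "🍻", "desc": "Выпить 15 кружек Ильяс эля"},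
--     "beer_king": {"name": "👑 Король таверны", "type": "beer", "count": 50, "icon": "👑", "desc": "Выпить 50 кружек Ильяс эля"},
--
--     # 💰 ТИТУЛЫ ЗА КРОШКИ
--     "crumbs_1000": {"name": "🧀 Сырный", "type": "crumbs", "amount": 1000, "icon": "🧀", "desc": "Накопить 1000 крошек"},
--     "crumbs_5000": {"name": "💰 Богач", "type": "crumbs", "amount": 5000, "icon": "💰", "desc": "Накопить 5000 крошек"},
--     "crumbs_10000": {"name": "💎 Магнат", "type": "crumbs", "amount": 10000, "icon": "💎", "desc": "Накопить 10000 крошек"},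
--     "crumbs_50000": {"name": "🏦 Крёз", "type": "crumbs", "amount": 50000, "icon": "🏦", "desc": "Накопить 50000 крошек"},
--
--     # 📦 ТИТУЛЫ ЗА СУНДУКИ
--     "chest_opener_10": {"name": "📦 Открыватель", "type": "chest", "count": 10, "icon": "📦", "desc": "Открыть 10 сундуков"},
--     "chest_opener_50": {"name": "🔓 Взломщик", "type": "chest", "count": 50, "icon": "🔓", "desc": "Открыть 50 сундуков"},
--     "chest_opener_100": {"name": "🗝️ Мастер ключей", "type": "chest", "count": 100, "icon": "🗝️", "desc": "Открыть 100 сундуков"},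
--
--     # 🎪 СЕКРЕТНЫЕ ТИТУЛЫ
--     "ghost": {"name": "👻 Призрак", "type": "secret", "icon": "👻", "desc": "Победить после смерти", "hidden": True},
--     "traitor": {"name": "🗡️💔 Предатель", "type": "secret", "icon": "🗡️", "desc": "Крыса убила Крысу", "hidden": True},
--     "victim": {"name": "⚰️ Жертва", "type": "secret", "icon": "⚰️", "desc": "Умереть первым 10 раз", "hidden": True},
--     "phoenix": {"name": "🔥🪽 Феникс", "type": "secret", "icon": "🔥", "desc": "Воскреснуть и победить", "hidden": True},
--     "chosen": {"name": "✨👁️ Избранный", "type": "secret", "icon": "✨", "desc": "Разблокировать все достижения", "hidden": True},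
--
--     # 🎭 ТИТУЛЫ ЗА СТИЛЬ
--     "diplomat": {"name": "🤝 Дипломат", "type": "style", "icon": "🤝", "desc": "Убедить всех голосовать за Крысу"},
--     "silent": {"name": "🤐 Молчун", "type": "style", "icon": "🤐", "desc": "5 игр без сообщений"},
--     "talker": {"name": "🗣️ Болтун", "type": "style", "icon": "🗣️", "desc": "1000 сообщений в чате"},
--     "strategist": {"name": "♟️ Стратег", "type": "style", "icon": "♟️", "desc": "Победить за 2 дня"},
--     "kamikaze": {"name": "💥 Камикадзе", "type": "style", "icon": "💥", "desc": "Пожертвовать собой"},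
-- }
--
-- def get_title_by_level(level: int) -> Optional[str]:
--     """Возвращает ID титула по уровню"""
--     best_title = None
--     best_level = 0
--     for tid, data in TITLES.items():
--         if data.get("type") == "level" and data.get("level", 0) <= level:
--             if data["level"] > best_level:
--                 best_level = data["level"]
--                 best_title = tid
--     return best_title
-- ===== SOURCE B (Python) =====
-- from typing import Optional
--
-- # Level thresholds extracted from TITLES (type == "level"), sorted ascending.
-- _LEVEL_TITLES = [
--     (1, "novice"), (5, "curious"), (10, "explorer"), (15, "experienced"),
--     (20, "hunter"), (25, "veteran"), (30, "master"), (40, "expert"),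
--     (50, "legend"), (75, "myth"), (100, "god"),
-- ]
--
-- def get_title_by_level(level: int) -> Optional[str]:
--     """Возвращает ID титула по уровню"""
--     # binary search: lo = index after the last threshold <= level
--     lo, hi = 0, len(_LEVEL_TITLES)
--     while lo < hi:
--         mid = (lo + hi) // 2
--         if _LEVEL_TITLES[mid][0] <= level:
--             lo = mid + 1
--         else:
--             hi = mid
--     if lo == 0:
--         return None
--     return _LEVEL_TITLES[lo - 1][1]
-- ===== Notes on version B (the rewrite author's own statement) =====
-- stated objective: alternative
-- what changed: Replaced the linear max-accumulator scan over the whole TITLES dict with a precomputed ascending list of the level thresholds and a hand-written bisect_right binary search for the largest threshold at or below the given level.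
import Mathlib
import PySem

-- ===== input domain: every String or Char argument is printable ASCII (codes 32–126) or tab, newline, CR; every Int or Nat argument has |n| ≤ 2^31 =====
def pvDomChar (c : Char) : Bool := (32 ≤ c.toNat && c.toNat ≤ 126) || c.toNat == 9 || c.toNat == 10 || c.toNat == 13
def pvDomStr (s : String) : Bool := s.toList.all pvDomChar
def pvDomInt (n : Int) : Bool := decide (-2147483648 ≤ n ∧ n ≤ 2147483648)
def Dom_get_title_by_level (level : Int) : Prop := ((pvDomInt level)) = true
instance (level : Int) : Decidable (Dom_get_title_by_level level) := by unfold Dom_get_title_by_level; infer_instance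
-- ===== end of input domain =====

-- B replaces A's full max-accumulator scan over TITLES with a binary search on a
-- precomputed sorted threshold list (objective: alternative algorithm; speed unmeasured on this fixed-size data).

-- ===== PORT A =====
-- TITLES as (tid, type, level field if present); only these fields matter to A.
def pvTitlesA : List (String × String × Option Int) := [
  ("novice", "level", some 1),
  ("curious", "level", some 5),
  ("explorer", "level", some 10),
  ("experienced", "level", some 15),
  ("hunter", "level", some 20),
  ("veteran", "level", some 25),
  ("master", "level", some 30),
  ("expert", "level", some 40),
  ("legend", "level", some 50),
  ("myth", "level", some 75),
  ("god", "level", some 100),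
  ("rat_king", "achievement", none),
  ("rat_emperor", "achievement", none),
  ("pack_leader", "achievement", none),
  ("mouse_god", "achievement", none),
  ("merciless", "achievement", none),
  ("butcher", "achievement", none),
  ("psychic", "achievement", none),
  ("puppeteer", "achievement", none),
  ("eagle_eye", "achievement", none),
  ("night_hunter", "achievement", none),
  ("lucky", "streak", none),
  ("invincible", "streak", none),
  ("legendary_streak", "streak", none),
  ("machine", "streak", none),
  ("collector", "collection", none),
  ("hoarder", "collection", none),
  ("cheese_tycoon", "collection", none),
  ("mythic_hunter", "collection", none),
  ("dice_novice", "dice", none),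
  ("dice_player", "dice", none),
  ("dice_gambler", "dice", none),
  ("dice_shadow", "dice", none),
  ("dice_legend", "dice", none),
  ("beer_lover", "beer", none),
  ("beer_connoisseur", "beer", none),
  ("beer_king", "beer", none),
  ("crumbs_1000", "crumbs", none),
  ("crumbs_5000", "crumbs", none),
  ("crumbs_10000", "crumbs", none),
  ("crumbs_50000", "crumbs", none),
  ("chest_opener_10", "chest", none),
  ("chest_opener_50", "chest", none),
  ("chest_opener_100", "chest", none),
  ("ghost", "secret", none),
  ("traitor", "secret", none),
  ("victim", "secret", none),
  ("phoenix", "secret", none),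
  ("chosen", "secret", none),
  ("diplomat", "style", none),
  ("silent", "style", none),
  ("talker", "style", none),
  ("strategist", "style", none),
  ("kamikaze", "style", none)
]

def get_title_by_level (level : Int) : Option String :=
  (pvTitlesA.foldl (fun (acc : Option String × Int) td =>
      if td.2.1 == "level" && td.2.2.getD 0 ≤ level then
        if td.2.2.getD 0 > acc.2 then (some td.1, td.2.2.getD 0) else acc
      else acc)
    (none, 0)).1

-- ===== PORT B =====
def pvLevelTitles : List (Int × String) := [
  (1, "novice"), (5, "curious"), (10, "explorer"), (15, "experienced"),
  (20, "hunter"), (25, "veteran"), (30, "master"), (40, "expert"),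
  (50, "legend"), (75, "myth"), (100, "god")]

-- the while-loop of Source B's hand-written bisect_right; fuel = hi - lo bounds the
-- number of iterations (each step halves the interval), so fuel ≥ hi - lo is enough
def pvBisect (level : Int) (fuel lo hi : Nat) : Nat :=
  match fuel with
  | 0 => lo
  | fuel + 1 =>
    if lo < hi then
      let mid := (lo + hi) / 2
      if (pvLevelTitles.getD mid (0, "")).1 ≤ level then pvBisect level fuel (mid + 1) hi
      else pvBisect level fuel lo mid
    else lo

def get_title_by_level_alt (level : Int) : Option String :=
  let lo := pvBisect level pvLevelTitles.length 0 pvLevelTitles.length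
  if lo = 0 then none
  else some (pvLevelTitles.getD (lo - 1) (0, "")).2

-- ===== PRECONDITION & SPEC =====
def Spec_get_title_by_level (level : Int) (out : Option String) : Prop := out = get_title_by_level_alt level
instance (level : Int) (out : Option String) : Decidable (Spec_get_title_by_level level out) := by unfold Spec_get_title_by_level; infer_instance

-- ===== CLAIM (what is proved, stated in full; the proofs are below) =====
def Claim_equal_get_title_by_level : Prop := ∀ (level : Int), Dom_get_title_by_level level → Spec_get_title_by_level level (get_title_by_level level)

-- ===== LEMMAS AND PROOFS =====
set_option maxRecDepth 8000

lemma pvAux0 (level : Int) (h2 : level < 1) :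
    get_title_by_level level = (none : Option String) ∧ get_title_by_level_alt level = (none : Option String) := by
  have c0 : ¬((1:Int) ≤ level) := by omega
  have c1 : ¬((5:Int) ≤ level) := by omega
  have c2 : ¬((10:Int) ≤ level) := by omega
  have c3 : ¬((15:Int) ≤ level) := by omega
  have c4 : ¬((20:Int) ≤ level) := by omega
  have c5 : ¬((25:Int) ≤ level) := by omega
  have c6 : ¬((30:Int) ≤ level) := by omega
  have c7 : ¬((40:Int) ≤ level) := by omega
  have c8 : ¬((50:Int) ≤ level) := by omega
  have c9 : ¬((75:Int) ≤ level) := by omega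
  have c10 : ¬((100:Int) ≤ level) := by omega
  constructor
  · simp [get_title_by_level, pvTitlesA, List.foldl, c0, c1, c2, c3, c4, c5, c6, c7, c8, c9, c10]
  · simp [get_title_by_level_alt, pvLevelTitles, pvBisect, c0, c1, c2, c5]

lemma pvAux1 (level : Int) (h1 : 1 ≤ level) (h2 : level < 5) :
    get_title_by_level level = (some "novice" : Option String) ∧ get_title_by_level_alt level = (some "novice" : Option String) := by
  have c0 : ((1:Int) ≤ level) := by omega
  have c1 : ¬((5:Int) ≤ level) := by omega
  have c2 : ¬((10:Int) ≤ level) := by omega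
  have c3 : ¬((15:Int) ≤ level) := by omega
  have c4 : ¬((20:Int) ≤ level) := by omega
  have c5 : ¬((25:Int) ≤ level) := by omega
  have c6 : ¬((30:Int) ≤ level) := by omega
  have c7 : ¬((40:Int) ≤ level) := by omega
  have c8 : ¬((50:Int) ≤ level) := by omega
  have c9 : ¬((75:Int) ≤ level) := by omega
  have c10 : ¬((100:Int) ≤ level) := by omega
  constructor
  · simp [get_title_by_level, pvTitlesA, List.foldl, c0, c1, c2, c3, c4, c5, c6, c7, c8, c9, c10]
  · simp [get_title_by_level_alt, pvLevelTitles, pvBisect, c0, c1, c2, c5]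

lemma pvAux2 (level : Int) (h1 : 5 ≤ level) (h2 : level < 10) :
    get_title_by_level level = (some "curious" : Option String) ∧ get_title_by_level_alt level = (some "curious" : Option String) := by
  have c0 : ((1:Int) ≤ level) := by omega
  have c1 : ((5:Int) ≤ level) := by omega
  have c2 : ¬((10:Int) ≤ level) := by omega
  have c3 : ¬((15:Int) ≤ level) := by omega
  have c4 : ¬((20:Int) ≤ level) := by omega
  have c5 : ¬((25:Int) ≤ level) := by omega
  have c6 : ¬((30:Int) ≤ level) := by omega
  have c7 : ¬((40:Int) ≤ level) := by omega
  have c8 : ¬((50:Int) ≤ level) := by omega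
  have c9 : ¬((75:Int) ≤ level) := by omega
  have c10 : ¬((100:Int) ≤ level) := by omega
  constructor
  · simp [get_title_by_level, pvTitlesA, List.foldl, c0, c1, c2, c3, c4, c5, c6, c7, c8, c9, c10]
  · simp [get_title_by_level_alt, pvLevelTitles, pvBisect, c1, c2, c5]

lemma pvAux3 (level : Int) (h1 : 10 ≤ level) (h2 : level < 15) :
    get_title_by_level level = (some "explorer" : Option String) ∧ get_title_by_level_alt level = (some "explorer" : Option String) := by
  have c0 : ((1:Int) ≤ level) := by omega
  have c1 : ((5:Int) ≤ level) := by omega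
  have c2 : ((10:Int) ≤ level) := by omega
  have c3 : ¬((15:Int) ≤ level) := by omega
  have c4 : ¬((20:Int) ≤ level) := by omega
  have c5 : ¬((25:Int) ≤ level) := by omega
  have c6 : ¬((30:Int) ≤ level) := by omega
  have c7 : ¬((40:Int) ≤ level) := by omega
  have c8 : ¬((50:Int) ≤ level) := by omega
  have c9 : ¬((75:Int) ≤ level) := by omega
  have c10 : ¬((100:Int) ≤ level) := by omega
  constructor
  · simp [get_title_by_level, pvTitlesA, List.foldl, c0, c1, c2, c3, c4, c5, c6, c7, c8, c9, c10]
  · simp [get_title_by_level_alt, pvLevelTitles, pvBisect, c2, c3, c4, c5]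

lemma pvAux4 (level : Int) (h1 : 15 ≤ level) (h2 : level < 20) :
    get_title_by_level level = (some "experienced" : Option String) ∧ get_title_by_level_alt level = (some "experienced" : Option String) := by
  have c0 : ((1:Int) ≤ level) := by omega
  have c1 : ((5:Int) ≤ level) := by omega
  have c2 : ((10:Int) ≤ level) := by omega
  have c3 : ((15:Int) ≤ level) := by omega
  have c4 : ¬((20:Int) ≤ level) := by omega
  have c5 : ¬((25:Int) ≤ level) := by omega
  have c6 : ¬((30:Int) ≤ level) := by omega
  have c7 : ¬((40:Int) ≤ level) := by omega
  have c8 : ¬((50:Int) ≤ level) := by omega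
  have c9 : ¬((75:Int) ≤ level) := by omega
  have c10 : ¬((100:Int) ≤ level) := by omega
  constructor
  · simp [get_title_by_level, pvTitlesA, List.foldl, c0, c1, c2, c3, c4, c5, c6, c7, c8, c9, c10]
  · simp [get_title_by_level_alt, pvLevelTitles, pvBisect, c2, c3, c4, c5]

lemma pvAux5 (level : Int) (h1 : 20 ≤ level) (h2 : level < 25) :
    get_title_by_level level = (some "hunter" : Option String) ∧ get_title_by_level_alt level = (some "hunter" : Option String) := by
  have c0 : ((1:Int) ≤ level) := by omega
  have c1 : ((5:Int) ≤ level) := by omega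
  have c2 : ((10:Int) ≤ level) := by omega
  have c3 : ((15:Int) ≤ level) := by omega
  have c4 : ((20:Int) ≤ level) := by omega
  have c5 : ¬((25:Int) ≤ level) := by omega
  have c6 : ¬((30:Int) ≤ level) := by omega
  have c7 : ¬((40:Int) ≤ level) := by omega
  have c8 : ¬((50:Int) ≤ level) := by omega
  have c9 : ¬((75:Int) ≤ level) := by omega
  have c10 : ¬((100:Int) ≤ level) := by omega
  constructor
  · simp [get_title_by_level, pvTitlesA, List.foldl, c0, c1, c2, c3, c4, c5, c6, c7, c8, c9, c10]
  · simp [get_title_by_level_alt, pvLevelTitles, pvBisect, c2, c4, c5]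

lemma pvAux6 (level : Int) (h1 : 25 ≤ level) (h2 : level < 30) :
    get_title_by_level level = (some "veteran" : Option String) ∧ get_title_by_level_alt level = (some "veteran" : Option String) := by
  have c0 : ((1:Int) ≤ level) := by omega
  have c1 : ((5:Int) ≤ level) := by omega
  have c2 : ((10:Int) ≤ level) := by omega
  have c3 : ((15:Int) ≤ level) := by omega
  have c4 : ((20:Int) ≤ level) := by omega
  have c5 : ((25:Int) ≤ level) := by omega
  have c6 : ¬((30:Int) ≤ level) := by omega
  have c7 : ¬((40:Int) ≤ level) := by omega
  have c8 : ¬((50:Int) ≤ level) := by omega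
  have c9 : ¬((75:Int) ≤ level) := by omega
  have c10 : ¬((100:Int) ≤ level) := by omega
  constructor
  · simp [get_title_by_level, pvTitlesA, List.foldl, c0, c1, c2, c3, c4, c5, c6, c7, c8, c9, c10]
  · simp [get_title_by_level_alt, pvLevelTitles, pvBisect, c5, c6, c7, c8]

lemma pvAux7 (level : Int) (h1 : 30 ≤ level) (h2 : level < 40) :
    get_title_by_level level = (some "master" : Option String) ∧ get_title_by_level_alt level = (some "master" : Option String) := by
  have c0 : ((1:Int) ≤ level) := by omega
  have c1 : ((5:Int) ≤ level) := by omega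
  have c2 : ((10:Int) ≤ level) := by omega
  have c3 : ((15:Int) ≤ level) := by omega
  have c4 : ((20:Int) ≤ level) := by omega
  have c5 : ((25:Int) ≤ level) := by omega
  have c6 : ((30:Int) ≤ level) := by omega
  have c7 : ¬((40:Int) ≤ level) := by omega
  have c8 : ¬((50:Int) ≤ level) := by omega
  have c9 : ¬((75:Int) ≤ level) := by omega
  have c10 : ¬((100:Int) ≤ level) := by omega
  constructor
  · simp [get_title_by_level, pvTitlesA, List.foldl, c0, c1, c2, c3, c4, c5, c6, c7, c8, c9, c10]
  · simp [get_title_by_level_alt, pvLevelTitles, pvBisect, c5, c6, c7, c8]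

lemma pvAux8 (level : Int) (h1 : 40 ≤ level) (h2 : level < 50) :
    get_title_by_level level = (some "expert" : Option String) ∧ get_title_by_level_alt level = (some "expert" : Option String) := by
  have c0 : ((1:Int) ≤ level) := by omega
  have c1 : ((5:Int) ≤ level) := by omega
  have c2 : ((10:Int) ≤ level) := by omega
  have c3 : ((15:Int) ≤ level) := by omega
  have c4 : ((20:Int) ≤ level) := by omega
  have c5 : ((25:Int) ≤ level) := by omega
  have c6 : ((30:Int) ≤ level) := by omega
  have c7 : ((40:Int) ≤ level) := by omega
  have c8 : ¬((50:Int) ≤ level) := by omega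
  have c9 : ¬((75:Int) ≤ level) := by omega
  have c10 : ¬((100:Int) ≤ level) := by omega
  constructor
  · simp [get_title_by_level, pvTitlesA, List.foldl, c0, c1, c2, c3, c4, c5, c6, c7, c8, c9, c10]
  · simp [get_title_by_level_alt, pvLevelTitles, pvBisect, c5, c7, c8]

lemma pvAux9 (level : Int) (h1 : 50 ≤ level) (h2 : level < 75) :
    get_title_by_level level = (some "legend" : Option String) ∧ get_title_by_level_alt level = (some "legend" : Option String) := by
  have c0 : ((1:Int) ≤ level) := by omega
  have c1 : ((5:Int) ≤ level) := by omega
  have c2 : ((10:Int) ≤ level) := by omega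
  have c3 : ((15:Int) ≤ level) := by omega
  have c4 : ((20:Int) ≤ level) := by omega
  have c5 : ((25:Int) ≤ level) := by omega
  have c6 : ((30:Int) ≤ level) := by omega
  have c7 : ((40:Int) ≤ level) := by omega
  have c8 : ((50:Int) ≤ level) := by omega
  have c9 : ¬((75:Int) ≤ level) := by omega
  have c10 : ¬((100:Int) ≤ level) := by omega
  constructor
  · simp [get_title_by_level, pvTitlesA, List.foldl, c0, c1, c2, c3, c4, c5, c6, c7, c8, c9, c10]
  · simp [get_title_by_level_alt, pvLevelTitles, pvBisect, c5, c8, c9, c10]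

lemma pvAux10 (level : Int) (h1 : 75 ≤ level) (h2 : level < 100) :
    get_title_by_level level = (some "myth" : Option String) ∧ get_title_by_level_alt level = (some "myth" : Option String) := by
  have c0 : ((1:Int) ≤ level) := by omega
  have c1 : ((5:Int) ≤ level) := by omega
  have c2 : ((10:Int) ≤ level) := by omega
  have c3 : ((15:Int) ≤ level) := by omega
  have c4 : ((20:Int) ≤ level) := by omega
  have c5 : ((25:Int) ≤ level) := by omega
  have c6 : ((30:Int) ≤ level) := by omega
  have c7 : ((40:Int) ≤ level) := by omega
  have c8 : ((50:Int) ≤ level) := by omega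
  have c9 : ((75:Int) ≤ level) := by omega
  have c10 : ¬((100:Int) ≤ level) := by omega
  constructor
  · simp [get_title_by_level, pvTitlesA, List.foldl, c0, c1, c2, c3, c4, c5, c6, c7, c8, c9, c10]
  · simp [get_title_by_level_alt, pvLevelTitles, pvBisect, c5, c8, c9, c10]

lemma pvAux11 (level : Int) (h1 : 100 ≤ level) :
    get_title_by_level level = (some "god" : Option String) ∧ get_title_by_level_alt level = (some "god" : Option String) := by
  have c0 : ((1:Int) ≤ level) := by omega
  have c1 : ((5:Int) ≤ level) := by omega
  have c2 : ((10:Int) ≤ level) := by omega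
  have c3 : ((15:Int) ≤ level) := by omega
  have c4 : ((20:Int) ≤ level) := by omega
  have c5 : ((25:Int) ≤ level) := by omega
  have c6 : ((30:Int) ≤ level) := by omega
  have c7 : ((40:Int) ≤ level) := by omega
  have c8 : ((50:Int) ≤ level) := by omega
  have c9 : ((75:Int) ≤ level) := by omega
  have c10 : ((100:Int) ≤ level) := by omega
  constructor
  · simp [get_title_by_level, pvTitlesA, List.foldl, c0, c1, c2, c3, c4, c5, c6, c7, c8, c9, c10]
  · simp [get_title_by_level_alt, pvLevelTitles, pvBisect, c5, c8, c10]


-- ===== VERDICT (by name: the statement is the Claim_ definition above) =====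
theorem get_title_by_level_spec : Claim_equal_get_title_by_level := by
  intro level _
  unfold Spec_get_title_by_level
  rcases lt_or_ge level 1 with h|h
  · exact (pvAux0 level h).1.trans (pvAux0 level h).2.symm
  rcases lt_or_ge level 5 with h2|h2
  · exact (pvAux1 level h h2).1.trans (pvAux1 level h h2).2.symm
  have h := h2
  rcases lt_or_ge level 10 with h2|h2
  · exact (pvAux2 level h h2).1.trans (pvAux2 level h h2).2.symm
  have h := h2
  rcases lt_or_ge level 15 with h2|h2
  · exact (pvAux3 level h h2).1.trans (pvAux3 level h h2).2.symm
  have h := h2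
  rcases lt_or_ge level 20 with h2|h2
  · exact (pvAux4 level h h2).1.trans (pvAux4 level h h2).2.symm
  have h := h2
  rcases lt_or_ge level 25 with h2|h2
  · exact (pvAux5 level h h2).1.trans (pvAux5 level h h2).2.symm
  have h := h2
  rcases lt_or_ge level 30 with h2|h2
  · exact (pvAux6 level h h2).1.trans (pvAux6 level h h2).2.symm
  have h := h2
  rcases lt_or_ge level 40 with h2|h2
  · exact (pvAux7 level h h2).1.trans (pvAux7 level h h2).2.symm
  have h := h2
  rcases lt_or_ge level 50 with h2|h2
  · exact (pvAux8 level h h2).1.trans (pvAux8 level h h2).2.symm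
  have h := h2
  rcases lt_or_ge level 75 with h2|h2
  · exact (pvAux9 level h h2).1.trans (pvAux9 level h h2).2.symm
  have h := h2
  rcases lt_or_ge level 100 with h2|h2
  · exact (pvAux10 level h h2).1.trans (pvAux10 level h h2).2.symm
  have h := h2
  exact (pvAux11 level h).1.trans (pvAux11 level h).2.symm
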